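-- pv_equiv track=rewrite | github.com/Bonamy/homeassistant-uk-fuel-prices | const.py | fuel_display_labels
-- ===== SOURCE A (Python) =====
-- FUEL_FAMILY: dict[str, tuple[str, str]] = {
--     "E10": ("Petrol", "E10"),
--     "E5": ("Petrol", "E5"),
--     "B7_STANDARD": ("Diesel", "B7"),
--     "B7_PREMIUM": ("Diesel", "Premium"),
--     "B10": ("Diesel", "B10"),
--     "HVO": ("Diesel", "HVO"),
-- }
--
-- def fuel_display_labels(selected_codes: list[str]) -> dict[str, str]:
--     """Build display labels for selected fuel types with smart disambiguation.
--
--     Returns a mapping of fuel code -> display label, e.g.: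
--       {"E10": "Petrol", "B7_STANDARD": "Diesel"}
--     or if two petrols are selected:
--       {"E10": "Petrol (E10)", "E5": "Petrol (E5)", "B7_STANDARD": "Diesel"}
--     """
--     from collections import Counter
--
--     # Count how many of each family are selected
--     family_counts: Counter[str] = Counter()
--     for code in selected_codes:
--         family, _ = FUEL_FAMILY.get(code, (code, code))
--         family_counts[family] += 1
--
--     labels: dict[str, str] = {}
--     for code in selected_codes:
--         family, short = FUEL_FAMILY.get(code, (code, code))
--         if family_counts[family] > 1:
--             labels[code] = f"{family} ({short})"
--         else:
--             labels[code] = family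
--
--     return labels
-- ===== SOURCE B (Python) =====
-- FUEL_FAMILY: dict[str, tuple[str, str]] = {
--     "E10": ("Petrol", "E10"),
--     "E5": ("Petrol", "E5"),
--     "B7_STANDARD": ("Diesel", "B7"),
--     "B7_PREMIUM": ("Diesel", "Premium"),
--     "B10": ("Diesel", "B10"),
--     "HVO": ("Diesel", "HVO"),
-- }
--
-- def fuel_display_labels(selected_codes: list[str]) -> dict[str, str]:
--     """Single pass: label each code with its family; when a family gains a
--     second member, retroactively disambiguate the first one in place."""
--     labels: dict[str, str] = {}
--     members: dict[str, list[str]] = {}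
--     for code in selected_codes:
--         family, short = FUEL_FAMILY.get(code, (code, code))
--         seen = members.setdefault(family, [])
--         seen.append(code)
--         if len(seen) == 1:
--             labels[code] = family
--         elif len(seen) == 2:
--             first = seen[0]
--             _, first_short = FUEL_FAMILY.get(first, (first, first))
--             labels[first] = f"{family} ({first_short})"
--             labels[code] = f"{family} ({short})"
--         else:
--             labels[code] = f"{family} ({short})"
--     return labels
-- ===== Notes on version B (the rewrite author's own statement) =====
-- stated objective: alternative
-- what changed: Replaces A's two-phase count-then-rescan (Counter pass over the list, then a second full pass consulting the counts) by a single pass that labels each code immediately and, via a family->members dict, retroactively rewrites the first member's label in place when its family gains a second member.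
import Mathlib
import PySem

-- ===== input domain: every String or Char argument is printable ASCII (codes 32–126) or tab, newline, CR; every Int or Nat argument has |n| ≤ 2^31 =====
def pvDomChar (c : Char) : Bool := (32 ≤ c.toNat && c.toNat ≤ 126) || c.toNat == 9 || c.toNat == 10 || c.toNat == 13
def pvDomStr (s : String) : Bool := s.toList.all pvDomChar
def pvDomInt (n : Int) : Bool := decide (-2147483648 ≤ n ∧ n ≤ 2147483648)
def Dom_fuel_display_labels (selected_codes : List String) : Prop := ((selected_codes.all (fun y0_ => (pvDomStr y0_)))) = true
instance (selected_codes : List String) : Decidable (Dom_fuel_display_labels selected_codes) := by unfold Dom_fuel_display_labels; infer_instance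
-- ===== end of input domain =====

-- B replaces A's count-then-rescan (two passes) by one pass that retroactively
-- disambiguates a family's first label in place when a second member appears
-- (objective: alternative single-pass decomposition, same asymptotic cost).

-- shared module-level constant FUEL_FAMILY
def FUEL_FAMILY : PySem.Dict String (String × String) :=
  PySem.Dict.ofList [("E10", ("Petrol", "E10")), ("E5", ("Petrol", "E5")),
    ("B7_STANDARD", ("Diesel", "B7")), ("B7_PREMIUM", ("Diesel", "Premium")),
    ("B10", ("Diesel", "B10")), ("HVO", ("Diesel", "HVO"))]

-- ===== PORT A =====
def fuel_display_labels (selected_codes : List String) : List (String × String) :=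
  let family_counts : PySem.Dict String Int :=
    selected_codes.foldl (fun d code =>
      let fs := FUEL_FAMILY.getD code (code, code)
      d.modify fs.1 0 (· + 1)) PySem.Dict.empty
  let labels : PySem.Dict String String :=
    selected_codes.foldl (fun l code =>
      let fs := FUEL_FAMILY.getD code (code, code)
      if 1 < family_counts.getD fs.1 0 then
        l.insert code (fs.1 ++ " (" ++ fs.2 ++ ")")
      else
        l.insert code fs.1) PySem.Dict.empty
  labels.items

-- ===== PORT B =====
def fuel_display_labels_alt (selected_codes : List String) : List (String × String) :=
  let st : PySem.Dict String String × PySem.Dict String (List String) :=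
    selected_codes.foldl (fun st code =>
      let labels := st.1
      let members := st.2
      let fs := FUEL_FAMILY.getD code (code, code)
      let seen := members.getD fs.1 [] ++ [code]
      let members := members.insert fs.1 seen
      if seen.length = 1 then
        (labels.insert code fs.1, members)
      else if seen.length = 2 then
        let first := seen.headI
        let fsh := FUEL_FAMILY.getD first (first, first)
        ((labels.insert first (fs.1 ++ " (" ++ fsh.2 ++ ")")).insert code
          (fs.1 ++ " (" ++ fs.2 ++ ")"), members)
      else
        (labels.insert code (fs.1 ++ " (" ++ fs.2 ++ ")"), members))
      (PySem.Dict.empty, PySem.Dict.empty)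
  st.1.items

-- ===== PRECONDITION & SPEC =====
def Spec_fuel_display_labels (selected_codes : List String) (out : List (String × String)) : Prop := out = fuel_display_labels_alt selected_codes
instance (selected_codes : List String) (out : List (String × String)) : Decidable (Spec_fuel_display_labels selected_codes out) := by unfold Spec_fuel_display_labels; infer_instance

-- ===== CLAIM (what is proved, stated in full; the proofs are below) =====
def Claim_equal_fuel_display_labels : Prop := ∀ (selected_codes : List String), Dom_fuel_display_labels selected_codes → Spec_fuel_display_labels selected_codes (fuel_display_labels selected_codes)

-- ===== LEMMAS AND PROOFS =====

-- family of a code, its disambiguated label, and the label the input list p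
-- assigns to code c (disambiguated iff p holds ≥ 2 members of c's family)
def pvFam (c : String) : String := (FUEL_FAMILY.getD c (c, c)).1
def pvDisamb (c : String) : String :=
  pvFam c ++ " (" ++ (FUEL_FAMILY.getD c (c, c)).2 ++ ")"
def pvVal (p : List String) (c : String) : String :=
  if 1 < (p.map pvFam).count (pvFam c) then pvDisamb c else pvFam c

lemma count_fam_eq_length_filter (p : List String) (f : String) :
    (p.map pvFam).count f = (p.filter (fun c => pvFam c == f)).length := by
  simp only [List.count, List.countP_map]
  rw [List.countP_eq_length_filter]
  rfl

lemma contains_of_items_map (d : PySem.Dict String String) (p : List String)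
    (g : String → String)
    (h : d.items = (PySem.Set.ofList p).map (fun c => (c, g c))) (x : String) :
    d.contains x = decide (x ∈ p) := by
  rw [PySem.Dict.contains_eq_decide_mem_keys]
  have hk : d.keys = PySem.Set.ofList p := by
    simp only [PySem.Dict.keys, h, List.map_map]
    simp [Function.comp_def]
  rw [hk]
  simp [PySem.Set.mem_ofList]

-- generic: a fold of inserts whose value depends only on the key
lemma items_foldl_insert_fun (g : String → String) (p : List String) :
    (p.foldl (fun (l : PySem.Dict String String) c => l.insert c (g c))
        PySem.Dict.empty).items
      = (PySem.Set.ofList p).map (fun c => (c, g c)) := by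
  induction p using List.reverseRecOn with
  | nil => simp [PySem.Dict.empty, PySem.Set.ofList]
  | append_singleton p c ih =>
    rw [List.foldl_append, List.foldl_cons, List.foldl_nil,
        PySem.Set.ofList_append_singleton]
    by_cases hc : c ∈ p
    · rw [PySem.Dict.items_insert_of_contains _ _ (by
        rw [contains_of_items_map _ p g ih]; simpa using hc)]
      rw [PySem.Set.add_of_mem (by simpa [PySem.Set.mem_ofList] using hc), ih,
        List.map_map]
      refine List.map_congr_left ?_
      intro a _
      by_cases hac : a = c <;> simp [hac]
    · rw [PySem.Dict.items_insert_of_not_contains _ _ (by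
        rw [contains_of_items_map _ p g ih]; simpa using hc)]
      rw [PySem.Set.add_of_not_mem (by simpa [PySem.Set.mem_ofList] using hc), ih,
        List.map_append]
      simp

lemma pvVal_snoc_of_ne (p : List String) (c a : String)
    (h : pvFam a ≠ pvFam c) : pvVal (p ++ [c]) a = pvVal p a := by
  simp [pvVal, List.count_append, Ne.symm h]

lemma pvVal_snoc_of_eq (p : List String) (c a : String)
    (h : pvFam a = pvFam c) :
    pvVal (p ++ [c]) a
      = (if 1 < (p.map pvFam).count (pvFam c) + 1 then pvDisamb a else pvFam a) := by
  simp [pvVal, List.count_append, h]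

-- A's counter lookup is the family count of the input list
lemma countsA_getD (xs : List String) (f : String) :
    (xs.foldl (fun (d : PySem.Dict String Int) code =>
        d.modify (FUEL_FAMILY.getD code (code, code)).1 0 (· + 1))
        PySem.Dict.empty).getD f 0
      = ((xs.map pvFam).count f : Int) := by
  have h : xs.foldl (fun (d : PySem.Dict String Int) code =>
        d.modify (FUEL_FAMILY.getD code (code, code)).1 0 (· + 1)) PySem.Dict.empty
      = (xs.map pvFam).foldl (fun d x => d.modify x 0 (· + 1)) PySem.Dict.empty := by
    rw [List.foldl_map]; rfl
  rw [h, PySem.Dict.getD_foldl_modify_add_one]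
  simp

-- characterization of A: ordered dedup of the input, each code labelled by pvVal
lemma fuel_display_labels_eq (xs : List String) :
    fuel_display_labels xs
      = (PySem.Set.ofList xs).map (fun c => (c, pvVal xs c)) := by
  show (xs.foldl (fun (l : PySem.Dict String String) code =>
      if 1 < (xs.foldl (fun (d : PySem.Dict String Int) code =>
          d.modify (FUEL_FAMILY.getD code (code, code)).1 0 (· + 1))
          PySem.Dict.empty).getD (FUEL_FAMILY.getD code (code, code)).1 0 then
        l.insert code ((FUEL_FAMILY.getD code (code, code)).1 ++ " ("
          ++ (FUEL_FAMILY.getD code (code, code)).2 ++ ")")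
      else
        l.insert code (FUEL_FAMILY.getD code (code, code)).1) PySem.Dict.empty).items
    = _
  have hstep : (fun (l : PySem.Dict String String) code =>
      if 1 < (xs.foldl (fun (d : PySem.Dict String Int) code =>
          d.modify (FUEL_FAMILY.getD code (code, code)).1 0 (· + 1))
          PySem.Dict.empty).getD (FUEL_FAMILY.getD code (code, code)).1 0 then
        l.insert code ((FUEL_FAMILY.getD code (code, code)).1 ++ " ("
          ++ (FUEL_FAMILY.getD code (code, code)).2 ++ ")")
      else
        l.insert code (FUEL_FAMILY.getD code (code, code)).1)
      = (fun (l : PySem.Dict String String) c => l.insert c (pvVal xs c)) := by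
    funext l c
    rw [countsA_getD xs]
    by_cases h1 : 1 < (xs.map pvFam).count (pvFam c)
    · rw [if_pos (by exact_mod_cast h1)]
      simp only [pvVal, if_pos h1, pvDisamb]
      rfl
    · rw [if_neg (by exact_mod_cast h1)]
      simp only [pvVal, if_neg h1]
      rfl
  rw [hstep, items_foldl_insert_fun]

-- B's step function (the literal lambda of the port)
def pvStepB (st : PySem.Dict String String × PySem.Dict String (List String))
    (code : String) : PySem.Dict String String × PySem.Dict String (List String) :=
  let labels := st.1
  let members := st.2
  let fs := FUEL_FAMILY.getD code (code, code)
  let seen := members.getD fs.1 [] ++ [code]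
  let members := members.insert fs.1 seen
  if seen.length = 1 then
    (labels.insert code fs.1, members)
  else if seen.length = 2 then
    let first := seen.headI
    let fsh := FUEL_FAMILY.getD first (first, first)
    ((labels.insert first (fs.1 ++ " (" ++ fsh.2 ++ ")")).insert code
      (fs.1 ++ " (" ++ fs.2 ++ ")"), members)
  else
    (labels.insert code (fs.1 ++ " (" ++ fs.2 ++ ")"), members)

lemma fuel_display_labels_alt_eq_foldl (xs : List String) :
    fuel_display_labels_alt xs
      = (xs.foldl pvStepB (PySem.Dict.empty, PySem.Dict.empty)).1.items := rfl

-- one step of B preserves the invariant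
lemma stepB_spec (p : List String) (c : String)
    (s : PySem.Dict String String × PySem.Dict String (List String))
    (ih1 : s.1.items = (PySem.Set.ofList p).map (fun a => (a, pvVal p a)))
    (ih2 : ∀ f, s.2.getD f [] = p.filter (fun a => pvFam a == f)) :
    (pvStepB s c).1.items
        = (PySem.Set.ofList (p ++ [c])).map (fun a => (a, pvVal (p ++ [c]) a))
      ∧ ∀ f, (pvStepB s c).2.getD f []
        = (p ++ [c]).filter (fun a => pvFam a == f) := by
  have hfam : (FUEL_FAMILY.getD c (c, c)).1 = pvFam c := rfl
  have hdis : pvFam c ++ " (" ++ (FUEL_FAMILY.getD c (c, c)).2 ++ ")" = pvDisamb c := rfl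
  have hcount : (p.map pvFam).count (pvFam c)
      = (p.filter (fun a => pvFam a == pvFam c)).length :=
    count_fam_eq_length_filter p (pvFam c)
  have hmem : ∀ f, (s.2.insert (pvFam c)
        (p.filter (fun a => pvFam a == pvFam c) ++ [c])).getD f []
      = (p ++ [c]).filter (fun a => pvFam a == f) := by
    intro f
    rw [PySem.Dict.getD_insert, List.filter_append]
    by_cases hf : f = pvFam c
    · subst hf
      simp
    · rw [if_neg hf, ih2 f]
      simp [Ne.symm hf]
  simp only [pvStepB, hfam, hdis, ih2]
  split_ifs with h1 h2
  · -- family not seen before: plain label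
    have hnil : p.filter (fun a => pvFam a == pvFam c) = [] := by
      simp only [List.length_append, List.length_singleton] at h1
      exact List.eq_nil_of_length_eq_zero (by omega)
    have hcp : c ∉ p := by
      intro hc
      have : c ∈ p.filter (fun a => pvFam a == pvFam c) :=
        List.mem_filter.mpr ⟨hc, by simp⟩
      rw [hnil] at this
      simp at this
    refine ⟨?_, hmem⟩
    rw [PySem.Dict.items_insert_of_not_contains _ _ (by
      rw [contains_of_items_map _ p _ ih1]; simpa using hcp)]
    rw [ih1, PySem.Set.ofList_append_singleton,
      PySem.Set.add_of_not_mem (by simpa [PySem.Set.mem_ofList] using hcp),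
      List.map_append]
    congr 1
    · refine List.map_congr_left fun a ha => ?_
      have hap : a ∈ p := (PySem.Set.mem_ofList _ _).mp ha
      have hne : pvFam a ≠ pvFam c := by
        intro he
        have : a ∈ p.filter (fun a => pvFam a == pvFam c) :=
          List.mem_filter.mpr ⟨hap, by simp [he]⟩
        rw [hnil] at this
        simp at this
      rw [pvVal_snoc_of_ne _ _ _ hne]
    · rw [List.map_singleton, pvVal_snoc_of_eq _ _ _ rfl]
      rw [hcount, hnil]
      simp
  · -- the family's second member: rewrite the first one, disambiguate both
    obtain ⟨first, hfilter⟩ : ∃ a, p.filter (fun a => pvFam a == pvFam c) = [a] := by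
      apply List.length_eq_one_iff.mp
      simp only [List.length_append, List.length_singleton] at h2
      omega
    have hfirst : first ∈ p ∧ pvFam first = pvFam c := by
      have : first ∈ p.filter (fun a => pvFam a == pvFam c) := by
        rw [hfilter]; simp
      exact ⟨(List.mem_filter.mp this).1, by
        have := (List.mem_filter.mp this).2; simpa using this⟩
    have huniq : ∀ a ∈ p, pvFam a = pvFam c → a = first := by
      intro a ha he
      have : a ∈ p.filter (fun a => pvFam a == pvFam c) :=
        List.mem_filter.mpr ⟨ha, by simp [he]⟩
      rw [hfilter] at this
      simpa using this
    have hn1 : (p.map pvFam).count (pvFam c) = 1 := by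
      rw [hcount, hfilter]
      rfl
    have hv1 : pvFam c ++ " (" ++ (FUEL_FAMILY.getD ((p.filter
          (fun a => pvFam a == pvFam c) ++ [c]).headI) (((p.filter
          (fun a => pvFam a == pvFam c) ++ [c]).headI), ((p.filter
          (fun a => pvFam a == pvFam c) ++ [c]).headI))).2 ++ ")"
        = pvDisamb first := by
      rw [hfilter]
      simp only [List.cons_append, List.headI]
      unfold pvDisamb
      rw [hfirst.2]
    rw [hv1, show (p.filter (fun a => pvFam a == pvFam c) ++ [c]).headI = first by
      rw [hfilter]; simp]
    refine ⟨?_, hmem⟩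
    by_cases hcf : c = first
    · -- the same code twice: one overwrite-in-place
      rw [← hcf] at hfirst huniq ⊢
      rw [PySem.Dict.insert_insert_self]
      rw [PySem.Dict.items_insert_of_contains _ _ (by
        rw [contains_of_items_map _ p _ ih1]; simpa using hfirst.1)]
      rw [ih1, List.map_map, PySem.Set.ofList_append_singleton,
        PySem.Set.add_of_mem (by simpa [PySem.Set.mem_ofList] using hfirst.1)]
      refine List.map_congr_left fun a ha => ?_
      have hap : a ∈ p := (PySem.Set.mem_ofList _ _).mp ha
      by_cases hac : a = c
      · subst hac
        simp only [Function.comp_apply, BEq.rfl, if_pos]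
        rw [pvVal_snoc_of_eq _ _ _ rfl, hn1]
        simp
      · have hne : pvFam a ≠ pvFam c := fun he => hac (huniq a hap he)
        simp only [Function.comp_apply, beq_iff_eq, if_neg hac]
        rw [pvVal_snoc_of_ne _ _ _ hne]
    · -- a new code: overwrite the first in place, append the new one
      have hcp : c ∉ p := fun hc => hcf (huniq c hc rfl)
      have hd1 : (s.1.insert first (pvDisamb first)).items
          = (PySem.Set.ofList p).map
              (fun a => (a, if a = first then pvDisamb first else pvVal p a)) := by
        rw [PySem.Dict.items_insert_of_contains _ _ (by
          rw [contains_of_items_map _ p _ ih1]; simpa using hfirst.1)]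
        rw [ih1, List.map_map]
        refine List.map_congr_left fun a _ => ?_
        by_cases h : a = first <;> simp [h]
      rw [PySem.Dict.items_insert_of_not_contains _ _ (by
        rw [contains_of_items_map _ p _ hd1]; simpa using hcp)]
      rw [hd1, PySem.Set.ofList_append_singleton,
        PySem.Set.add_of_not_mem (by simpa [PySem.Set.mem_ofList] using hcp),
        List.map_append]
      congr 1
      · refine List.map_congr_left fun a ha => ?_
        have hap : a ∈ p := (PySem.Set.mem_ofList _ _).mp ha
        by_cases haf : a = first
        · subst haf
          rw [if_pos rfl, pvVal_snoc_of_eq _ _ _ hfirst.2, hn1]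
          simp [pvDisamb, hfirst.2]
        · have hne : pvFam a ≠ pvFam c := fun he => haf (huniq a hap he)
          rw [if_neg haf, pvVal_snoc_of_ne _ _ _ hne]
      · rw [List.map_singleton, pvVal_snoc_of_eq _ _ _ rfl, hn1]
        simp
  · -- the family already had ≥ 2 members: just label the new code
    have hn2 : 2 ≤ (p.map pvFam).count (pvFam c) := by
      simp only [List.length_append, List.length_singleton] at h1 h2
      rw [hcount]
      omega
    refine ⟨?_, hmem⟩
    by_cases hcp : c ∈ p
    · rw [PySem.Dict.items_insert_of_contains _ _ (by
        rw [contains_of_items_map _ p _ ih1]; simpa using hcp)]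
      rw [ih1, List.map_map, PySem.Set.ofList_append_singleton,
        PySem.Set.add_of_mem (by simpa [PySem.Set.mem_ofList] using hcp)]
      refine List.map_congr_left fun a ha => ?_
      by_cases hac : a = c
      · subst hac
        simp only [Function.comp_apply, BEq.rfl, if_pos]
        rw [pvVal_snoc_of_eq _ _ _ rfl]
        rw [if_pos (by omega)]
      · simp only [Function.comp_apply, beq_iff_eq, if_neg hac]
        by_cases hfa : pvFam a = pvFam c
        · rw [pvVal_snoc_of_eq _ _ _ hfa, if_pos (by omega), pvVal,
            if_pos (by rw [hfa]; omega)]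
        · rw [pvVal_snoc_of_ne _ _ _ hfa]
    · rw [PySem.Dict.items_insert_of_not_contains _ _ (by
        rw [contains_of_items_map _ p _ ih1]; simpa using hcp)]
      rw [ih1, PySem.Set.ofList_append_singleton,
        PySem.Set.add_of_not_mem (by simpa [PySem.Set.mem_ofList] using hcp),
        List.map_append]
      congr 1
      · refine List.map_congr_left fun a ha => ?_
        by_cases hfa : pvFam a = pvFam c
        · rw [pvVal_snoc_of_eq _ _ _ hfa, if_pos (by omega), pvVal,
            if_pos (by rw [hfa]; omega)]
        · rw [pvVal_snoc_of_ne _ _ _ hfa]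
      · rw [List.map_singleton, pvVal_snoc_of_eq _ _ _ rfl, if_pos (by omega)]

-- invariant of B's single pass
lemma stateB_invariant (p : List String) :
    (p.foldl pvStepB (PySem.Dict.empty, PySem.Dict.empty)).1.items
        = (PySem.Set.ofList p).map (fun c => (c, pvVal p c))
      ∧ ∀ f, (p.foldl pvStepB (PySem.Dict.empty, PySem.Dict.empty)).2.getD f []
        = p.filter (fun c => pvFam c == f) := by
  induction p using List.reverseRecOn with
  | nil =>
    constructor <;>
      simp [PySem.Dict.empty, PySem.Set.ofList, PySem.Dict.getD, PySem.Dict.get?]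
  | append_singleton p c ih =>
    rw [List.foldl_append, List.foldl_cons, List.foldl_nil]
    exact stepB_spec p c _ ih.1 ih.2

-- ===== VERDICT (by name: the statement is the Claim_ definition above) =====
theorem fuel_display_labels_spec : Claim_equal_fuel_display_labels := by
  intro xs _
  show fuel_display_labels xs = fuel_display_labels_alt xs
  rw [fuel_display_labels_eq, fuel_display_labels_alt_eq_foldl,
    (stateB_invariant xs).1]
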